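-- pv_equiv track=rewrite | github.com/heemin88/algorithm | 프로그래머스/unrated/172928. 공원 산책/공원 산책.py | solution
-- ===== SOURCE A (Python) =====
-- def solution(park, routes):
--     parks=[[]for _ in range(len(park))]
--     h = len(park)
--     w=0
--     start_x=0
--     start_y=0
--     dx=[0,0,-1,1] # w e n s
--     dy=[-1,1,0,0]
--     def move(x,y,idx):
--         xx = x+dx[idx]
--         yy = y+dy[idx]
--         if 0<=xx<h and 0<=yy<w and parks[xx][yy]!='X':
--             return xx,yy
--         else:
--             return -1,-1
--
--     for i in range(len(park)):
--         tmp = list(park[i])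
--         for k,j in enumerate(tmp):
--             if j == 'S':
--                 start_x=i
--                 start_y=k
--         parks[i]=tmp
--     w = len(parks[i])
--     for r in routes:
--         s,num =r.split()
--         result =[start_x,start_y]
--         for i in range(int(num)):
--             if s == 'W': tmp,tmp2 = move(start_x,start_y,0)
--             elif s == 'E': tmp,tmp2 = move(start_x,start_y,1)
--             elif s == 'N':tmp,tmp2 =  move(start_x,start_y,2)
--             elif s == 'S':tmp,tmp2 =  move(start_x,start_y,3)
--             if tmp == -1:
--                 start_x,start_y = result[0],result[1]
--                 break
--             start_x,start_y = tmp,tmp2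
--     return start_x,start_y
-- ===== SOURCE B (Python) =====
-- def solution(park, routes):
--     H, W = len(park), len(park[0])
--     x = y = 0
--     for i, row in enumerate(park):
--         for j, c in enumerate(row):
--             if c == 'S':
--                 x, y = i, j
--     DIRS = {'W': (0, -1), 'E': (0, 1), 'N': (-1, 0), 'S': (1, 0)}
--     for r in routes:
--         op, ns = r.split()
--         dx, dy = DIRS[op]
--         n = int(ns)
--         cells = [(x + dx * k, y + dy * k) for k in range(1, n + 1)]
--         if cells:
--             tx, ty = cells[-1]
--             if 0 <= tx < H and 0 <= ty < W and all(park[cx][cy] != 'X' for cx, cy in cells):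
--                 x, y = tx, ty
--     return (x, y)
-- ===== Notes on version B (the rewrite author's own statement) =====
-- stated objective: simpler
-- what changed: A simulates each route one cell at a time with a saved position and an explicit revert-and-break; B computes the route's target cell in closed form (start + dir*num) and validates the whole move in two shots (target in bounds, segment free of 'X'), updating the position only if valid.
-- outside the precondition, e.g. on solution(['OO', 'S'], ['E 1']): A returns (1, 0), B raises IndexError; on solution(['SO'], ['E 1', 'Q 1']): A returns (0, 1), B raises KeyError
import Mathlib
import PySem

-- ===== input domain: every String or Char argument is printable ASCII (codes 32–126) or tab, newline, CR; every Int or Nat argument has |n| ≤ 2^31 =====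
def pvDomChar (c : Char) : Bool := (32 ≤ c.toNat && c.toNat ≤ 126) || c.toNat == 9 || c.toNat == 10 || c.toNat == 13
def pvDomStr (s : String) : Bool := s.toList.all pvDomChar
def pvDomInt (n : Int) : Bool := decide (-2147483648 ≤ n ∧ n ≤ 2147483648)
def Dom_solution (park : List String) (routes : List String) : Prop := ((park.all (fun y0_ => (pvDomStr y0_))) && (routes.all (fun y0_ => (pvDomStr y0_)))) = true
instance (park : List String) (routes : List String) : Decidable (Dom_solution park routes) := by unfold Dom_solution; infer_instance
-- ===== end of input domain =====

-- B replaces A's cell-by-cell simulation with revert by a closed-form target (start + dir*num)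
-- validated in two shots (target bounds + one segment scan); same return value on Pre_.

-- ===== PORT A =====
-- parks[i][j] != 'X'; none = IndexError (only reachable on a ragged park, excluded by Pre_)
def pvCellA (parks : List (List Char)) (i j : Int) : Bool :=
  match (PySem.List.pyGet? parks i).bind (fun row => PySem.List.pyGet? row j) with
  | some c => c != 'X'
  | none => false

def pvMoveA (h w : Int) (parks : List (List Char)) (x y : Int) (idx : Nat) : Int × Int :=
  let dx : List Int := [0, 0, -1, 1]  -- w e n s
  let dy : List Int := [-1, 1, 0, 0]
  let xx := x + dx.getD idx 0
  let yy := y + dy.getD idx 0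
  if 0 ≤ xx ∧ xx < h ∧ 0 ≤ yy ∧ yy < w ∧ pvCellA parks xx yy = true then (xx, yy) else (-1, -1)

-- the inner 'for i in range(int(num))' loop: step, check tmp == -1 (revert & break), continue
def pvLoopA (h w : Int) (parks : List (List Char)) (s : String) :
    Nat → Int → Int → Int → Int → Int × Int
  | 0, x, y, _, _ => (x, y)
  | n + 1, x, y, rx, ry =>
    let t : Int × Int :=
      if s = "W" then pvMoveA h w parks x y 0
      else if s = "E" then pvMoveA h w parks x y 1
      else if s = "N" then pvMoveA h w parks x y 2
      else if s = "S" then pvMoveA h w parks x y 3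
      else (-1, -1)  -- Python reads the stale tmp here (or NameError); unreachable under Pre_
    if t.1 = -1 then (rx, ry) else pvLoopA h w parks s n t.1 t.2 rx ry

-- the start-scan loop: record (i, k) at every 'S', last one wins
def pvScanA (park : List String) : Int × Int :=
  (PySem.List.enumerate park 0).foldl
    (fun st p => (PySem.List.enumerate p.2.toList 0).foldl
        (fun st2 q => if q.2 = 'S' then (p.1, q.1) else st2) st)
    (0, 0)

def solution (park : List String) (routes : List String) : Int × Int :=
  let parks : List (List Char) := park.map String.toList
  let h : Int := park.length
  let st0 := pvScanA park
  -- w = len(parks[i]) with i left at len(park)-1; park = [] is a NameError, excluded by Pre_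
  let w : Int := (PySem.List.pyGetD parks ((park.length : Int) - 1) []).length
  routes.foldl (fun (st : Int × Int) r =>
      let ts := PySem.Str.split₀ r
      let s := ts.getD 0 ""      -- s, num = r.split(); not exactly two parts = ValueError, excluded by Pre_
      let num := ts.getD 1 ""
      let n := (PySem.Int.ofStr? num).getD 0  -- int(num); ValueError excluded by Pre_
      pvLoopA h w parks s n.toNat st.1 st.2 st.1 st.2) st0

-- ===== PORT B =====
-- park[i][j] != 'X'; none = IndexError (only reachable on a ragged park, excluded by Pre_)
def pvCellB (park : List String) (i j : Int) : Bool :=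
  match (PySem.List.pyGet? park i).bind (fun row => PySem.Str.pyGet? row j) with
  | some c => c != 'X'
  | none => false

def pvDirs : PySem.Dict String (Int × Int) :=
  PySem.Dict.ofList [("W", (0, -1)), ("E", (0, 1)), ("N", (-1, 0)), ("S", (1, 0))]

-- same last-'S' scan as A's
def pvScanB (park : List String) : Int × Int :=
  (PySem.List.enumerate park 0).foldl
    (fun st p => (PySem.List.enumerate p.2.toList 0).foldl
        (fun st2 q => if q.2 = 'S' then (p.1, q.1) else st2) st)
    (0, 0)

def solution_alt (park : List String) (routes : List String) : Int × Int :=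
  let H : Int := park.length
  let W : Int := PySem.Str.len (PySem.List.pyGetD park 0 "")  -- park[0]; [] raises, excluded by Pre_
  let st0 := pvScanB park
  routes.foldl (fun (st : Int × Int) r =>
      let ts := PySem.Str.split₀ r
      let op := ts.getD 0 ""
      let ns := ts.getD 1 ""
      let d := (PySem.Dict.get? pvDirs op).getD (0, 0)  -- DIRS[op]; KeyError excluded by Pre_
      let n := (PySem.Int.ofStr? ns).getD 0
      let cells := (PySem.List.pyRange 1 (n + 1) 1).map (fun k => (st.1 + d.1 * k, st.2 + d.2 * k))
      if cells ≠ [] then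
        let t := PySem.List.pyGetD cells (-1) (0, 0)  -- cells[-1]: the target
        if 0 ≤ t.1 ∧ t.1 < H ∧ 0 ≤ t.2 ∧ t.2 < W ∧
            cells.all (fun c => pvCellB park c.1 c.2) = true
        then t else st
      else st) st0

-- ===== PRECONDITION & SPEC =====
-- Pre_ excludes: the empty park and, when routes are present, ragged parks (A indexes past a short row or uses the last
-- row's width — IndexError or an accidental bound; B raises IndexError there), and routes that
-- are not "DIR n" with DIR in W/E/N/S and n an int literal (A raises ValueError/NameError or
-- no-ops off stale loop state; B raises KeyError/ValueError there).
def Pre_solution (park : List String) (routes : List String) : Prop :=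
  park ≠ [] ∧
  (routes = [] ∨ ∀ s ∈ park, PySem.Str.len s = PySem.Str.len (park.headD "")) ∧
  ∀ r ∈ routes,
    (PySem.Str.split₀ r).length = 2 ∧
    (PySem.Str.split₀ r).headD "" ∈ (["W", "E", "N", "S"] : List String) ∧
    (PySem.Int.ofStr? ((PySem.Str.split₀ r).getD 1 "")).isSome

instance (park : List String) (routes : List String) : Decidable (Pre_solution park routes) := by
  unfold Pre_solution; infer_instance

def pvWitness_solution : List String × List String := (["SO", "OX"], ["E 1", "S 1"])

def Spec_solution (park : List String) (routes : List String) (out : Int × Int) : Prop :=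
  out = solution_alt park routes
instance (park : List String) (routes : List String) (out : Int × Int) :
    Decidable (Spec_solution park routes out) := by unfold Spec_solution; infer_instance

-- ===== CLAIM (what is proved, stated in full; the proofs are below) =====
def Claim_equal_solution : Prop := ∀ (park : List String) (routes : List String),
  Dom_solution park routes → Pre_solution park routes →
  Spec_solution park routes (solution park routes)

-- ===== LEMMAS AND PROOFS =====

theorem pyGet?_map_toList (park : List String) (i : Int) :
    PySem.List.pyGet? (park.map String.toList) i = (PySem.List.pyGet? park i).map String.toList := by
  simp [PySem.List.pyGet?, PySem.List.pyIdx?]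

theorem cellAB (park : List String) (i j : Int) :
    pvCellA (park.map String.toList) i j = pvCellB park i j := by
  unfold pvCellA pvCellB
  rw [pyGet?_map_toList]
  cases PySem.List.pyGet? park i <;> simp

def stepT (h w : Int) (parks : List (List Char)) (dx dy : Int) (x y : Int) : Int × Int :=
  if 0 ≤ x + dx ∧ x + dx < h ∧ 0 ≤ y + dy ∧ y + dy < w ∧ pvCellA parks (x + dx) (y + dy) = true
  then (x + dx, y + dy) else (-1, -1)

def loopT (h w : Int) (parks : List (List Char)) (dx dy : Int) :
    Nat → Int → Int → Int → Int → Int × Int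
  | 0, x, y, _, _ => (x, y)
  | n + 1, x, y, rx, ry =>
    let t := stepT h w parks dx dy x y
    if t.1 = -1 then (rx, ry) else loopT h w parks dx dy n t.1 t.2 rx ry

theorem moveA_W (h w : Int) (parks : List (List Char)) (x y : Int) :
    pvMoveA h w parks x y 0 = stepT h w parks 0 (-1) x y := by
  simp [pvMoveA, stepT]
theorem moveA_E (h w : Int) (parks : List (List Char)) (x y : Int) :
    pvMoveA h w parks x y 1 = stepT h w parks 0 1 x y := by
  simp [pvMoveA, stepT]
theorem moveA_N (h w : Int) (parks : List (List Char)) (x y : Int) :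
    pvMoveA h w parks x y 2 = stepT h w parks (-1) 0 x y := by
  simp [pvMoveA, stepT]
theorem moveA_S (h w : Int) (parks : List (List Char)) (x y : Int) :
    pvMoveA h w parks x y 3 = stepT h w parks 1 0 x y := by
  simp [pvMoveA, stepT]

theorem loopA_W (h w : Int) (parks : List (List Char)) (n : Nat) (x y rx ry : Int) :
    pvLoopA h w parks "W" n x y rx ry = loopT h w parks 0 (-1) n x y rx ry := by
  induction n generalizing x y with
  | zero => rfl
  | succ n ih => simp [pvLoopA, loopT, moveA_W, ih]

theorem loopA_E (h w : Int) (parks : List (List Char)) (n : Nat) (x y rx ry : Int) :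
    pvLoopA h w parks "E" n x y rx ry = loopT h w parks 0 1 n x y rx ry := by
  induction n generalizing x y with
  | zero => rfl
  | succ n ih => simp [pvLoopA, loopT, moveA_E, ih]

theorem loopA_N (h w : Int) (parks : List (List Char)) (n : Nat) (x y rx ry : Int) :
    pvLoopA h w parks "N" n x y rx ry = loopT h w parks (-1) 0 n x y rx ry := by
  induction n generalizing x y with
  | zero => rfl
  | succ n ih => simp [pvLoopA, loopT, moveA_N, ih]

theorem loopA_S (h w : Int) (parks : List (List Char)) (n : Nat) (x y rx ry : Int) :
    pvLoopA h w parks "S" n x y rx ry = loopT h w parks 1 0 n x y rx ry := by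
  induction n generalizing x y with
  | zero => rfl
  | succ n ih => simp [pvLoopA, loopT, moveA_S, ih]

theorem all_shift (parks : List (List Char)) (dx dy x y : Int) (n : Nat) :
    (PySem.List.pyRange 2 ((n:Int)+3) 1).all (fun k => pvCellA parks (x+dx*k) (y+dy*k))
      = (PySem.List.pyRange 1 ((n:Int)+2) 1).all
          (fun k => pvCellA parks ((x+dx)+dx*k) ((y+dy)+dy*k)) := by
  rw [PySem.List.pyRange_one 2 ((n:Int)+3), PySem.List.pyRange_one 1 ((n:Int)+2)]
  have h1 : ((n:Int)+3-2).toNat = n+1 := by omega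
  have h2 : ((n:Int)+2-1).toNat = n+1 := by omega
  rw [h1, h2, List.all_map, List.all_map]
  congr 1
  funext k
  have e1 : x + dx * (2 + (k:Int)) = (x+dx) + dx * (1 + (k:Int)) := by ring
  have e2 : y + dy * (2 + (k:Int)) = (y+dy) + dy * (1 + (k:Int)) := by ring
  simp [Function.comp, e1, e2]

def pvCondB (h w : Int) (parks : List (List Char)) (dx dy x y m : Int) : Bool :=
  decide (0 ≤ x + dx*m) && decide (x + dx*m < h) && decide (0 ≤ y + dy*m) && decide (y + dy*m < w) &&
  ((PySem.List.pyRange 1 (m+1) 1).all (fun k => pvCellA parks (x+dx*k) (y+dy*k)))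

theorem condB_succ (h w : Int) (parks : List (List Char)) (dx dy x y : Int) (n : Nat) :
    pvCondB h w parks dx dy x y ((n:Int)+2)
      = (pvCellA parks (x+dx) (y+dy) && pvCondB h w parks dx dy (x+dx) (y+dy) ((n:Int)+1)) := by
  unfold pvCondB
  have e3 : ((n:Int)+2+1) = (n:Int)+3 := by ring
  have e4 : ((n:Int)+1+1) = (n:Int)+2 := by ring
  rw [e3, e4, PySem.List.pyRange_one_cons (by omega : (1:Int) < (n:Int)+3), List.all_cons]
  rw [(by norm_num : (1:Int)+1 = 2), all_shift]
  have b1 : (x+dx) + dx*((n:Int)+1) = x + dx*((n:Int)+2) := by ring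
  have b2 : (y+dy) + dy*((n:Int)+1) = y + dy*((n:Int)+2) := by ring
  have c1 : x + dx*(1:Int) = x + dx := by ring
  have c2 : y + dy*(1:Int) = y + dy := by ring
  rw [b1, b2, c1, c2]
  rw [Bool.eq_iff_iff]
  simp only [Bool.and_eq_true]
  tauto

theorem step_bounds (h w dx dy x y m : Int)
    (hd : (dx = 0 ∧ (dy = 1 ∨ dy = -1)) ∨ (dy = 0 ∧ (dx = 1 ∨ dx = -1)))
    (hx0 : 0 ≤ x) (hx1 : x < h) (hy0 : 0 ≤ y) (hy1 : y < w ∨ y = 0)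
    (hm : 1 ≤ m) (h1 : 0 ≤ x+dx*m) (h2 : x+dx*m < h) (h3 : 0 ≤ y+dy*m) (h4 : y+dy*m < w) :
    0 ≤ x+dx ∧ x+dx < h ∧ 0 ≤ y+dy ∧ y+dy < w := by
  rcases hd with ⟨hdx, hdy|hdy⟩ | ⟨hdy, hdx|hdx⟩ <;> subst hdx <;> subst hdy <;>
    rcases hy1 with hy1|hy1 <;>
    simp only [zero_mul, one_mul, neg_mul, add_zero] at * <;> omega

theorem condB_one (h w : Int) (parks : List (List Char)) (dx dy x y : Int) :
    pvCondB h w parks dx dy x y 1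
      = (decide (0 ≤ x + dx) && decide (x + dx < h) && decide (0 ≤ y + dy) && decide (y + dy < w) &&
         pvCellA parks (x+dx) (y+dy)) := by
  unfold pvCondB
  rw [(by norm_num : (1:Int)+1 = 1+1), PySem.List.pyRange_one_singleton, List.all_cons, List.all_nil]
  have c1 : x + dx*(1:Int) = x + dx := by ring
  have c2 : y + dy*(1:Int) = y + dy := by ring
  rw [c1, c2]
  cases pvCellA parks (x+dx) (y+dy) <;> simp

theorem loopT_closed (h w : Int) (parks : List (List Char)) (dx dy : Int)
    (hd : (dx = 0 ∧ (dy = 1 ∨ dy = -1)) ∨ (dy = 0 ∧ (dx = 1 ∨ dx = -1))) :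
    ∀ (n : Nat) (x y rx ry : Int), 0 ≤ x → x < h → 0 ≤ y → (y < w ∨ y = 0) →
    loopT h w parks dx dy (n+1) x y rx ry =
      if pvCondB h w parks dx dy x y ((n:Int)+1) then (x + dx*((n:Int)+1), y + dy*((n:Int)+1))
      else (rx, ry) := by
  intro n
  induction n with
  | zero =>
    intro x y rx ry hx0 hx1 hy0 hy1
    simp only [Nat.cast_zero, zero_add]
    rw [loopT, condB_one]
    by_cases hs : 0 ≤ x + dx ∧ x + dx < h ∧ 0 ≤ y + dy ∧ y + dy < w ∧
        pvCellA parks (x+dx) (y+dy) = true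
    · rw [stepT, if_pos hs]
      obtain ⟨a1, a2, a3, a4, a5⟩ := hs
      simp only [a1, a2, a3, a4, a5, decide_true, Bool.and_self, if_true]
      have : ¬ (x + dx = -1) := by omega
      simp [loopT, this, mul_one]
    · rw [stepT, if_neg hs]
      have hc : ¬ ((decide (0 ≤ x + dx) && decide (x + dx < h) && decide (0 ≤ y + dy) &&
          decide (y + dy < w) && pvCellA parks (x+dx) (y+dy)) = true) := by
        simp only [Bool.and_eq_true, decide_eq_true_eq]
        tauto
      simp [hc]
  | succ n ih =>
    intro x y rx ry hx0 hx1 hy0 hy1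
    rw [loopT]
    by_cases hs : 0 ≤ x + dx ∧ x + dx < h ∧ 0 ≤ y + dy ∧ y + dy < w ∧
        pvCellA parks (x+dx) (y+dy) = true
    · rw [stepT, if_pos hs]
      obtain ⟨a1, a2, a3, a4, a5⟩ := hs
      have hne : ¬ ((x + dx, y + dy).1 = -1) := by simp; omega
      rw [if_neg hne]
      rw [ih (x+dx) (y+dy) rx ry a1 a2 a3 (Or.inl a4)]
      have hcast : ((n+1 : Nat) : Int) + 1 = (n:Int) + 2 := by push_cast; ring
      rw [hcast, condB_succ, a5, Bool.true_and]
      have b1 : (x+dx) + dx*((n:Int)+1) = x + dx*((n:Int)+2) := by ring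
      have b2 : (y+dy) + dy*((n:Int)+1) = y + dy*((n:Int)+2) := by ring
      rw [b1, b2]
    · rw [stepT, if_neg hs]
      rw [if_pos rfl]
      have hcast : ((n+1 : Nat) : Int) + 1 = (n:Int) + 2 := by push_cast; ring
      rw [hcast]
      have hc : ¬ (pvCondB h w parks dx dy x y ((n:Int)+2) = true) := by
        intro hcond
        unfold pvCondB at hcond
        simp only [Bool.and_eq_true, decide_eq_true_eq] at hcond
        obtain ⟨⟨⟨⟨h1, h2⟩, h3⟩, h4⟩, hall⟩ := hcond
        have hb := step_bounds h w dx dy x y ((n:Int)+2) hd hx0 hx1 hy0 hy1 (by omega) h1 h2 h3 h4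
        have hcell : pvCellA parks (x+dx) (y+dy) = true := by
          have h1mem : (1:Int) ∈ PySem.List.pyRange 1 ((n:Int)+2+1) 1 := by
            rw [PySem.List.mem_pyRange_one]; omega
          have := List.all_eq_true.mp hall 1 h1mem
          simpa [mul_one] using this
        exact hs ⟨hb.1, hb.2.1, hb.2.2.1, hb.2.2.2, hcell⟩
      simp [hc]

def pvInv (park : List String) (st : Int × Int) : Prop :=
  0 ≤ st.1 ∧ st.1 < (park.length : Int) ∧ 0 ≤ st.2 ∧
    (st.2 < PySem.Str.len (PySem.List.pyGetD park 0 "") ∨ st.2 = 0)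

def pvRcond (r : String) : Prop :=
  (PySem.Str.split₀ r).length = 2 ∧
  (PySem.Str.split₀ r).headD "" ∈ (["W", "E", "N", "S"] : List String) ∧
  (PySem.Int.ofStr? ((PySem.Str.split₀ r).getD 1 "")).isSome

def pvAbody (park : List String) : Int × Int → String → Int × Int :=
  fun st r =>
    let parks : List (List Char) := park.map String.toList
    let h : Int := park.length
    let w : Int := (PySem.List.pyGetD parks ((park.length : Int) - 1) []).length
    let ts := PySem.Str.split₀ r
    let s := ts.getD 0 ""
    let num := ts.getD 1 ""
    let n := (PySem.Int.ofStr? num).getD 0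
    pvLoopA h w parks s n.toNat st.1 st.2 st.1 st.2

def pvBbody (park : List String) : Int × Int → String → Int × Int :=
  fun st r =>
    let H : Int := park.length
    let W : Int := PySem.Str.len (PySem.List.pyGetD park 0 "")
    let ts := PySem.Str.split₀ r
    let op := ts.getD 0 ""
    let ns := ts.getD 1 ""
    let d := (PySem.Dict.get? pvDirs op).getD (0, 0)
    let n := (PySem.Int.ofStr? ns).getD 0
    let cells := (PySem.List.pyRange 1 (n + 1) 1).map (fun k => (st.1 + d.1 * k, st.2 + d.2 * k))
    if cells ≠ [] then
      let t := PySem.List.pyGetD cells (-1) (0, 0)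
      if 0 ≤ t.1 ∧ t.1 < H ∧ 0 ≤ t.2 ∧ t.2 < W ∧
          cells.all (fun c => pvCellB park c.1 c.2) = true
      then t else st
    else st

theorem solutionA_foldl (park routes : List String) :
    solution park routes = routes.foldl (pvAbody park) (pvScanA park) := rfl

theorem solutionB_foldl (park routes : List String) :
    solution_alt park routes = routes.foldl (pvBbody park) (pvScanB park) := rfl

theorem wA_eq (park : List String) (hne : park ≠ [])
    (hrect : ∀ s ∈ park, PySem.Str.len s = PySem.Str.len (park.headD "")) :
    ((PySem.List.pyGetD (park.map String.toList) ((park.length : Int) - 1) []).length : Int)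
      = PySem.Str.len (PySem.List.pyGetD park 0 "") := by
  have hlen : 0 < park.length := List.length_pos_iff.mpr hne
  rw [PySem.List.pyGetD_eq_getElem (park.map String.toList) [] (by omega) (by simp)]
  have hidx : (((park.length : Int) - 1).toNat) = park.length - 1 := by omega
  simp only [hidx, List.getElem_map]
  have hmem : park[park.length - 1] ∈ park := List.getElem_mem _
  have h1 := hrect _ hmem
  have h0 : PySem.List.pyGetD park 0 "" = park.headD "" := by
    cases park with
    | nil => exact absurd rfl hne
    | cons a t => simp [PySem.List.pyGetD_zero_cons]
  rw [h0, ← h1]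
  simp [PySem.Str.len_eq]

theorem routeB_nil (park : List String) (H W dx dy p x y : Int) (hp : p ≤ 0) :
    (let cells := (PySem.List.pyRange 1 (p+1) 1).map (fun k => (x + dx*k, y + dy*k));
     if cells ≠ [] then
       (let t := PySem.List.pyGetD cells (-1) ((0:Int), (0:Int));
        if 0 ≤ t.1 ∧ t.1 < H ∧ 0 ≤ t.2 ∧ t.2 < W ∧
            cells.all (fun c => pvCellB park c.1 c.2) = true
        then t else (x, y))
     else (x, y)) = (x, y) := by
  have : PySem.List.pyRange 1 (p+1) 1 = [] := PySem.List.pyRange_one_eq_nil (by omega)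
  simp [this]

theorem routeB_closed (park : List String) (H W dx dy p x y : Int) (hp : 0 < p) :
    (let cells := (PySem.List.pyRange 1 (p+1) 1).map (fun k => (x + dx*k, y + dy*k));
     if cells ≠ [] then
       (let t := PySem.List.pyGetD cells (-1) ((0:Int), (0:Int));
        if 0 ≤ t.1 ∧ t.1 < H ∧ 0 ≤ t.2 ∧ t.2 < W ∧
            cells.all (fun c => pvCellB park c.1 c.2) = true
        then t else (x, y))
     else (x, y))
    = (if pvCondB H W (park.map String.toList) dx dy x y p then (x + dx*p, y + dy*p)
       else (x, y)) := by
  have hsplit : PySem.List.pyRange 1 (p+1) 1 = PySem.List.pyRange 1 p 1 ++ [p] :=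
    PySem.List.pyRange_one_succ_right (by omega)
  have hne : (PySem.List.pyRange 1 (p+1) 1).map (fun k => (x + dx*k, y + dy*k)) ≠ [] := by
    rw [hsplit]; simp
  have ht : PySem.List.pyGetD
      ((PySem.List.pyRange 1 (p+1) 1).map (fun k => (x + dx*k, y + dy*k))) (-1)
      ((0:Int), (0:Int)) = (x + dx*p, y + dy*p) := by
    rw [hsplit, List.map_append, List.map_singleton,
      PySem.List.pyGetD_neg_one_append_singleton]
  have hall : ((PySem.List.pyRange 1 (p+1) 1).map (fun k => (x + dx*k, y + dy*k))).all
        (fun c => pvCellB park c.1 c.2)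
      = (PySem.List.pyRange 1 (p+1) 1).all
          (fun k => pvCellA (park.map String.toList) (x + dx*k) (y + dy*k)) := by
    rw [List.all_map]
    congr 1
    funext k
    simp [Function.comp, cellAB]
  simp only [hne, ne_eq, not_false_iff, if_true, ht, hall]
  by_cases hb : pvCondB H W (park.map String.toList) dx dy x y p = true
  · have hb' := hb
    unfold pvCondB at hb'
    simp only [Bool.and_eq_true, decide_eq_true_eq] at hb'
    rw [if_pos (by tauto), if_pos hb]
  · rw [if_neg hb, if_neg (by
      intro hc
      apply hb
      unfold pvCondB
      simp only [Bool.and_eq_true, decide_eq_true_eq]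
      tauto)]

theorem body_eq (park : List String) (hne : park ≠ [])
    (hrect : ∀ s ∈ park, PySem.Str.len s = PySem.Str.len (park.headD ""))
    (r : String) (hr : pvRcond r) (st : Int × Int) (hinv : pvInv park st) :
    pvAbody park st r = pvBbody park st r ∧ pvInv park (pvBbody park st r) := by
  obtain ⟨x, y⟩ := st
  obtain ⟨hlen2, hmem, _⟩ := hr
  rcases hts : PySem.Str.split₀ r with _ | ⟨s, _ | ⟨num, _ | _⟩⟩ <;>
    rw [hts] at hlen2 <;> simp at hlen2
  rw [hts] at hmem
  simp only [List.headD_cons, List.mem_cons, List.not_mem_nil, or_false] at hmem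
  obtain ⟨hx0, hx1, hy0, hy1⟩ := hinv
  simp only [pvInv] at hy1 ⊢
  set H : Int := (park.length : Int) with hH
  set W : Int := PySem.Str.len (PySem.List.pyGetD park 0 "") with hW
  set parks : List (List Char) := park.map String.toList with hparks
  have hwW : ((PySem.List.pyGetD parks ((park.length : Int) - 1) []).length : Int) = W :=
    wA_eq park hne hrect
  have key : ∃ dx dy : Int,
      (∀ n x' y' rx ry, pvLoopA H ((PySem.List.pyGetD parks ((park.length : Int) - 1) []).length : Int) parks s n x' y' rx ry
        = loopT H W parks dx dy n x' y' rx ry) ∧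
      (PySem.Dict.get? pvDirs s).getD ((0:Int), (0:Int)) = (dx, dy) ∧
      ((dx = 0 ∧ (dy = 1 ∨ dy = -1)) ∨ (dy = 0 ∧ (dx = 1 ∨ dx = -1))) := by
    rcases hmem with rfl | rfl | rfl | rfl
    · exact ⟨0, -1, fun n x' y' rx ry => by rw [loopA_W, hwW], by decide, by norm_num⟩
    · exact ⟨0, 1, fun n x' y' rx ry => by rw [loopA_E, hwW], by decide, by norm_num⟩
    · exact ⟨-1, 0, fun n x' y' rx ry => by rw [loopA_N, hwW], by decide, by norm_num⟩
    · exact ⟨1, 0, fun n x' y' rx ry => by rw [loopA_S, hwW], by decide, by norm_num⟩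
  obtain ⟨dx, dy, hloop, hdict, hd⟩ := key
  set p : Int := (PySem.Int.ofStr? num).getD 0 with hp
  have hA : pvAbody park (x, y) r
      = loopT H W parks dx dy p.toNat x y x y := by
    simp only [pvAbody, hts, List.getD_cons_zero, List.getD_cons_succ, ← hp]
    exact hloop _ _ _ _ _
  have hB : pvBbody park (x, y) r
      = (let cells := (PySem.List.pyRange 1 (p+1) 1).map (fun k => (x + dx*k, y + dy*k));
         if cells ≠ [] then
           (let t := PySem.List.pyGetD cells (-1) ((0:Int), (0:Int));
            if 0 ≤ t.1 ∧ t.1 < H ∧ 0 ≤ t.2 ∧ t.2 < W ∧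
                cells.all (fun c => pvCellB park c.1 c.2) = true
            then t else (x, y))
         else (x, y)) := by
    simp only [pvBbody, hts, List.getD_cons_zero, List.getD_cons_succ, hdict, ← hp]
    rfl
  clear_value p
  clear_value H W parks
  rcases le_or_gt p 0 with hple | hpgt
  · rw [hA, hB, routeB_nil park H W dx dy p x y hple]
    have : p.toNat = 0 := by omega
    rw [this]
    exact ⟨rfl, hx0, hx1, hy0, hy1⟩
  · have hnp : ((p.toNat - 1 : Nat) : Int) + 1 = p := by omega
    have hsucc : p.toNat = (p.toNat - 1) + 1 := by omega
    rw [hA, hB, routeB_closed park H W dx dy p x y hpgt, ← hparks, hsucc,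
      loopT_closed H W parks dx dy hd (p.toNat - 1) x y x y hx0 hx1 hy0 hy1, hnp]
    refine ⟨rfl, ?_⟩
    by_cases hb : pvCondB H W parks dx dy x y p = true
    · rw [if_pos hb]
      have hb' := hb
      unfold pvCondB at hb'
      simp only [Bool.and_eq_true, decide_eq_true_eq] at hb'
      obtain ⟨⟨⟨⟨h1, h2⟩, h3⟩, h4⟩, -⟩ := hb'
      exact ⟨h1, h2, h3, Or.inl h4⟩
    · rw [if_neg hb]
      exact ⟨hx0, hx1, hy0, hy1⟩

theorem scanAB (park : List String) : pvScanA park = pvScanB park := rfl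

theorem scan_inv (park : List String) (hne : park ≠ [])
    (hrect : ∀ s ∈ park, PySem.Str.len s = PySem.Str.len (park.headD "")) :
    pvInv park (pvScanA park) := by
  have hlen : 0 < park.length := List.length_pos_iff.mpr hne
  have hW : ∀ s ∈ park, PySem.Str.len s = PySem.Str.len (PySem.List.pyGetD park 0 "") := by
    intro s hs
    rw [hrect s hs]
    cases park with
    | nil => exact absurd rfl hne
    | cons a t => simp [PySem.List.pyGetD_zero_cons]
  unfold pvScanA
  apply List.foldlRecOn
  · exact ⟨le_refl 0, by show (0:Int) < _; exact_mod_cast hlen, le_refl 0, Or.inr rfl⟩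
  · intro st hst prow hprow
    apply List.foldlRecOn
    · exact hst
    · intro st2 hst2 q hq
      by_cases hSq : q.2 = 'S'
      · rw [if_pos hSq]
        rw [PySem.List.mem_enumerate_iff] at hprow hq
        obtain ⟨i, hilt, rfl⟩ := hprow
        obtain ⟨j, hjlt, rfl⟩ := hq
        refine ⟨by simp, by simp; exact_mod_cast hilt, by simp, Or.inl ?_⟩
        have := hW _ (List.getElem_mem hilt)
        rw [PySem.Str.len_eq] at this
        simp only [zero_add, ← this]
        exact_mod_cast hjlt
      · rw [if_neg hSq]; exact hst2

set_option maxHeartbeats 1000000 in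
theorem fold_eq (park : List String) (hne : park ≠ [])
    (hrect : ∀ s ∈ park, PySem.Str.len s = PySem.Str.len (park.headD "")) :
    ∀ (rs : List String), (∀ r ∈ rs, pvRcond r) → ∀ st : Int × Int, pvInv park st →
      rs.foldl (pvAbody park) st = rs.foldl (pvBbody park) st := by
  intro rs
  induction rs with
  | nil => intro _ _ _; rfl
  | cons r rs ih =>
    intro hr st hinv
    obtain ⟨heq, hinv'⟩ := body_eq park hne hrect r (hr r List.mem_cons_self) st hinv
    simp only [List.foldl_cons]
    rw [heq]
    exact ih (fun r' hr' => hr r' (List.mem_cons_of_mem _ hr')) _ hinv'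

set_option maxHeartbeats 1000000 in
theorem solution_eq_alt' (park : List String) (routes : List String)
    (hpre : Pre_solution park routes) : solution park routes = solution_alt park routes := by
  obtain ⟨hne, hrect0, hroutes⟩ := hpre
  rcases hrect0 with rfl | hrect
  · rw [solutionA_foldl, solutionB_foldl, ← scanAB]
    rw [List.foldl_nil, List.foldl_nil]
  · rw [solutionA_foldl, solutionB_foldl, ← scanAB]
    exact fold_eq park hne hrect routes hroutes (pvScanA park)
      (scan_inv park hne hrect)

-- ===== VERDICT (by name: the statement is the Claim_ definition above) =====
theorem solution_spec : Claim_equal_solution := by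
  intro park routes _ hpre
  unfold Spec_solution
  exact solution_eq_alt' park routes hpre
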